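-- pv_equiv track=rewrite | github.com/jcub1011/Simple_Calculator | graphing_calculator.py | locate_x_and_y_indexes
-- ===== SOURCE A (Python) =====
-- def locate_x_and_y_indexes(function):
--     """
--     Finds the indices of the x's and y's.
--
--     :param function: A function with x's and y's.
--     :return: A list of x indexes and a list of y indexes.
--     """
--
--     x_indexes = []
--     y_indexes = []
--     for index, character in enumerate(function):
--         if character == "x":
--             x_indexes.append(index)
--         elif character == "y":
--             y_indexes.append(index)
--         # elif end
--     # for end
--
--     return x_indexes, y_indexes
-- ===== SOURCE B (Python) =====
-- def locate_x_and_y_indexes(function):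
--     """Two independent filtered passes instead of one combined branching loop."""
--     x_indexes = [index for index, character in enumerate(function) if character == "x"]
--     y_indexes = [index for index, character in enumerate(function) if character == "y"]
--     return x_indexes, y_indexes
-- ===== Notes on version B (the rewrite author's own statement) =====
-- stated objective: simpler
-- what changed: Replaces the single loop with an if/elif chain appending into two mutable accumulators by two independent filtered comprehension passes, one per character; the combined branching traversal disappears.
import Mathlib
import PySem

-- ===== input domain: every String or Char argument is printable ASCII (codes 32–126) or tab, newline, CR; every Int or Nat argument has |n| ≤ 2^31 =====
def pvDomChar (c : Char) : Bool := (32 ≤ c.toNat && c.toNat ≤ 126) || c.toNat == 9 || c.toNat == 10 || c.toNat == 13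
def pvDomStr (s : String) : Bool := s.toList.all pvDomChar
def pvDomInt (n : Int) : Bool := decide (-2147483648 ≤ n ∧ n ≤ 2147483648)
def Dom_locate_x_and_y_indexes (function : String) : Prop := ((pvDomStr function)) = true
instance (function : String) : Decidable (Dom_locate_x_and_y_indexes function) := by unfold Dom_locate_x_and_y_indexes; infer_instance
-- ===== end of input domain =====

-- B replaces A's single if/elif accumulator loop by two independent filtered passes over the enumerated string (objective: simpler).


-- ===== PORT A =====
-- 'for index, character in enumerate(function): if == "x": append; elif == "y": append'
def locate_x_and_y_indexes (function : String) : List Int × List Int :=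
  (PySem.List.enumerate function.toList 0).foldl
    (fun (acc : List Int × List Int) p =>
      if p.2 == 'x' then (acc.1 ++ [p.1], acc.2)
      else if p.2 == 'y' then (acc.1, acc.2 ++ [p.1])
      else acc)
    ([], [])

-- ===== PORT B =====
-- two independent filtered comprehensions over enumerate(function)
def locate_x_and_y_indexes_alt (function : String) : List Int × List Int :=
  (((PySem.List.enumerate function.toList 0).filter (fun p => p.2 == 'x')).map (·.1),
   ((PySem.List.enumerate function.toList 0).filter (fun p => p.2 == 'y')).map (·.1))

-- ===== PRECONDITION & SPEC =====
def Spec_locate_x_and_y_indexes (function : String) (out : List Int × List Int) : Prop := out = locate_x_and_y_indexes_alt function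
instance (function : String) (out : List Int × List Int) : Decidable (Spec_locate_x_and_y_indexes function out) := by unfold Spec_locate_x_and_y_indexes; infer_instance

-- ===== CLAIM (what is proved, stated in full; the proofs are below) =====
def Claim_equal_locate_x_and_y_indexes : Prop := ∀ (function : String), Dom_locate_x_and_y_indexes function → Spec_locate_x_and_y_indexes function (locate_x_and_y_indexes function)

-- ===== LEMMAS AND PROOFS =====
-- A's single pair-state loop computes exactly the two filtered passes, for any list of (index, char) pairs.
theorem foldl_pair_eq_filters (l : List (Int × Char)) (xs ys : List Int) :
    l.foldl
      (fun (acc : List Int × List Int) p =>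
        if p.2 == 'x' then (acc.1 ++ [p.1], acc.2)
        else if p.2 == 'y' then (acc.1, acc.2 ++ [p.1])
        else acc)
      (xs, ys)
    = (xs ++ (l.filter (fun p => p.2 == 'x')).map (·.1),
       ys ++ (l.filter (fun p => p.2 == 'y')).map (·.1)) := by
  induction l generalizing xs ys with
  | nil => simp
  | cons p rest ih =>
    simp only [List.foldl_cons, List.filter_cons]
    by_cases hx : p.2 == 'x'
    · have hy : ¬ (p.2 == 'y') = true := by
        simp_all
      simp only [hx, if_true]
      rw [ih]
      simp [hy]
    · by_cases hy : p.2 == 'y'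
      · simp only [hx, hy, if_true, Bool.false_eq_true, if_false]
        rw [ih]
        simp [hx]
      · simp only [hx, hy, Bool.false_eq_true, if_false]
        rw [ih]

-- ===== VERDICT (by name: the statement is the Claim_ definition above) =====
theorem locate_x_and_y_indexes_spec : Claim_equal_locate_x_and_y_indexes := by
  intro f _
  unfold Spec_locate_x_and_y_indexes locate_x_and_y_indexes locate_x_and_y_indexes_alt
  simpa using foldl_pair_eq_filters (PySem.List.enumerate f.toList 0) [] []
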